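-- pv_equiv track=rewrite | github.com/FalkSinke/IntegratedCircuits | Chips/plot1.py | initialise_penalty_grid
-- ===== SOURCE A (Python) =====
-- x_max = 17
--
-- y_max = 16
--
-- z_max = 7
--
-- def initialise_penalty_grid(points_dict, heat):
--     penalty_grid = [[[0 for i in range(z_max+1)] for j in range(y_max+1)] for k in range(x_max+1)]
--
--     for x in range(len(penalty_grid)):
--         for y in range(len(penalty_grid[x])):
--             for z in range(len(penalty_grid[x][y])):
--                 for gate in points_dict:
--                     distance = calc_admissable([x,y,z], points_dict[gate])
--                     penalty = heat - (distance*2);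
--                     if penalty < 0:
--                         penalty = 0
--                     penalty_grid[x][y][z] += penalty
--
--     return penalty_grid
--
-- def calc_admissable(a, b):
--     return abs(a[0] - b[0]) + abs(a[1]-b[1]) + abs(a[2] - b[2])
-- ===== SOURCE B (Python) =====
-- x_max = 17
--
-- y_max = 16
--
-- z_max = 7
--
--
-- def calc_admissable(a, b):
--     return abs(a[0] - b[0]) + abs(a[1] - b[1]) + abs(a[2] - b[2])
--
--
-- def initialise_penalty_grid(points_dict, heat):
--     # Scatter formulation: start from the all-zero grid and, per gate, add its
--     # clamped penalty only inside the gate's (clamped) radius box; every cell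
--     # outside the box would receive 0 anyway.
--     grid = [[[0 for i in range(z_max + 1)] for j in range(y_max + 1)] for k in range(x_max + 1)]
--     r = heat // 2
--     for gate in points_dict:
--         b = points_dict[gate]
--         gx, gy, gz = b[0], b[1], b[2]
--         for x in range(max(0, gx - r), min(x_max, gx + r) + 1):
--             for y in range(max(0, gy - r), min(y_max, gy + r) + 1):
--                 for z in range(max(0, gz - r), min(z_max, gz + r) + 1):
--                     p = heat - 2 * calc_admissable([x, y, z], [gx, gy, gz])
--                     if p > 0:
--                         grid[x][y][z] += p
--     return grid
-- ===== Notes on version B (the rewrite author's own statement) =====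
-- stated objective: alternative
-- what changed: Gather became scatter: instead of visiting all 2448 cells and summing over every gate per cell, B initialises the zero grid and, for each gate, adds its clamped penalty only over the gate's radius box clamped to the grid.
import Mathlib
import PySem

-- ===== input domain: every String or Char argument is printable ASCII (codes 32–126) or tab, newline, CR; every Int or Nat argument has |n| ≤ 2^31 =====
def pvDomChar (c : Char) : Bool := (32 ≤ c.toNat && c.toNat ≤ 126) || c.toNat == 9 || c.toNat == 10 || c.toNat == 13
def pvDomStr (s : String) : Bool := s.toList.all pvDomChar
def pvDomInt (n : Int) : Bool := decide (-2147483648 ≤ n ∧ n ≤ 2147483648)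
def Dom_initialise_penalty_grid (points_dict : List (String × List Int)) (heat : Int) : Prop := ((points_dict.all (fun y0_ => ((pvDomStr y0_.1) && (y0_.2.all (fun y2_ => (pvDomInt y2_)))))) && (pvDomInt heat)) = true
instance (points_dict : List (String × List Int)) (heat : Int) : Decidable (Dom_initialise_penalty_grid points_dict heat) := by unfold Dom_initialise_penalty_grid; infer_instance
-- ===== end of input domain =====

-- B replaces A's cell-major gather (every cell × every gate) by a per-gate scatter that only
-- visits each gate's radius box clamped to the grid (objective: alternative; return value proved equal).

-- ===== PORT A =====
-- helper of A: Manhattan distance (a[0],a[1],a[2] vs b[0],b[1],b[2]); pyGetD is exact here because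
-- Pre_ guarantees every gate list has ≥ 3 entries (and [x,y,z] always has 3)
def calc_admissable (a b : List Int) : Int :=
  |PySem.List.pyGetD a 0 0 - PySem.List.pyGetD b 0 0| +
  |PySem.List.pyGetD a 1 0 - PySem.List.pyGetD b 1 0| +
  |PySem.List.pyGetD a 2 0 - PySem.List.pyGetD b 2 0|

-- 'grid[x][y][z] += w' (the same statement occurs in A and in B); indices are in range in both loops
def pyAddAt3 (g : List (List (List Int))) (x y z w : Int) : List (List (List Int)) :=
  PySem.List.pySetD g x (PySem.List.pySetD (PySem.List.pyGetD g x []) y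
    (PySem.List.pySetD (PySem.List.pyGetD (PySem.List.pyGetD g x []) y []) z
      (PySem.List.pyGetD (PySem.List.pyGetD (PySem.List.pyGetD g x []) y []) z 0 + w)))

-- A: build the zero grid, then for every cell sum the clamped penalty over all gates.
-- 'for gate in points_dict: … points_dict[gate]' iterates the dict's items (keys are unique).
def initialise_penalty_grid (points_dict : List (String × List Int)) (heat : Int) : List (List (List Int)) :=
  let penalty_grid := (PySem.List.pyRange 0 (17+1) 1).map (fun _k =>
    (PySem.List.pyRange 0 (16+1) 1).map (fun _j =>
      (PySem.List.pyRange 0 (7+1) 1).map (fun _i => (0:Int))))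
  (PySem.List.pyRange 0 (PySem.List.len penalty_grid) 1).foldl (fun g x =>
    (PySem.List.pyRange 0 (PySem.List.len (PySem.List.pyGetD g x [])) 1).foldl (fun g y =>
      (PySem.List.pyRange 0 (PySem.List.len (PySem.List.pyGetD (PySem.List.pyGetD g x []) y [])) 1).foldl (fun g z =>
        ((PySem.Dict.ofList points_dict).items).foldl (fun g gate =>
          let distance := calc_admissable [x, y, z] gate.2
          let penalty := heat - distance * 2
          let penalty' := if penalty < 0 then 0 else penalty
          pyAddAt3 g x y z penalty') g) g) g) penalty_grid

-- ===== PORT B =====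
-- B: zero grid, then scatter each gate's penalty over its clamped radius box only
def initialise_penalty_grid_alt (points_dict : List (String × List Int)) (heat : Int) : List (List (List Int)) :=
  let grid := (PySem.List.pyRange 0 (17+1) 1).map (fun _k =>
    (PySem.List.pyRange 0 (16+1) 1).map (fun _j =>
      (PySem.List.pyRange 0 (7+1) 1).map (fun _i => (0:Int))))
  let r := PySem.Int.floordiv heat 2
  ((PySem.Dict.ofList points_dict).items).foldl (fun g gate =>
    let b := gate.2
    let gx := PySem.List.pyGetD b 0 0
    let gy := PySem.List.pyGetD b 1 0
    let gz := PySem.List.pyGetD b 2 0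
    (PySem.List.pyRange (max 0 (gx - r)) (min 17 (gx + r) + 1) 1).foldl (fun g x =>
      (PySem.List.pyRange (max 0 (gy - r)) (min 16 (gy + r) + 1) 1).foldl (fun g y =>
        (PySem.List.pyRange (max 0 (gz - r)) (min 7 (gz + r) + 1) 1).foldl (fun g z =>
          let p := heat - 2 * calc_admissable [x, y, z] [gx, gy, gz]
          if 0 < p then pyAddAt3 g x y z p else g) g) g) g) grid

-- ===== PRECONDITION & SPEC =====
-- Pre_ excludes exactly the inputs on which Python A raises IndexError: some gate of the dict
-- (effective value after dict construction) has fewer than 3 coordinates. (B raises there too.)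
def Pre_initialise_penalty_grid (points_dict : List (String × List Int)) (heat : Int) : Prop :=
  ∀ v ∈ (PySem.Dict.ofList points_dict).values, 3 ≤ v.length

instance (points_dict : List (String × List Int)) (heat : Int) : Decidable (Pre_initialise_penalty_grid points_dict heat) := by
  unfold Pre_initialise_penalty_grid; infer_instance

def pvWitness_initialise_penalty_grid : (List (String × List Int)) × Int := ([("a", [1, 2, 3])], 4)

def Spec_initialise_penalty_grid (points_dict : List (String × List Int)) (heat : Int) (out : List (List (List Int))) : Prop := out = initialise_penalty_grid_alt points_dict heat
instance (points_dict : List (String × List Int)) (heat : Int) (out : List (List (List Int))) : Decidable (Spec_initialise_penalty_grid points_dict heat out) := by unfold Spec_initialise_penalty_grid; infer_instance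

-- ===== CLAIM (what is proved, stated in full; the proofs are below) =====
def Claim_equal_initialise_penalty_grid : Prop := ∀ (points_dict : List (String × List Int)) (heat : Int), Dom_initialise_penalty_grid points_dict heat → Pre_initialise_penalty_grid points_dict heat → Spec_initialise_penalty_grid points_dict heat (initialise_penalty_grid points_dict heat)

-- ===== LEMMAS AND PROOFS =====

-- the shape every intermediate grid keeps: 18 rows of 17 columns of 8 cells
def Sh (g : List (List (List Int))) : Prop :=
  g.length = 18 ∧ ∀ x : Nat, x < 18 →
    (g.getD x []).length = 17 ∧ ∀ y : Nat, y < 17 → ((g.getD x []).getD y []).length = 8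

-- the clamped penalty one gate contributes to one cell (exactly A's arithmetic)
def pen (heat x y z : Int) (p : String × List Int) : Int :=
  if heat - calc_admissable [x, y, z] p.2 * 2 < 0 then 0 else heat - calc_admissable [x, y, z] p.2 * 2

-- the zero grid both ports start from
def zeroGrid : List (List (List Int)) :=
  (PySem.List.pyRange 0 (17+1) 1).map (fun _k =>
    (PySem.List.pyRange 0 (16+1) 1).map (fun _j =>
      (PySem.List.pyRange 0 (7+1) 1).map (fun _i => (0:Int))))

-- pointwise addition of a per-cell weight to the whole grid
def addGrid (g : List (List (List Int))) (f : Int → Int → Int → Int) : List (List (List Int)) :=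
  g.mapIdx (fun x row => row.mapIdx (fun y sub => sub.mapIdx (fun z v => v + f x y z)))

-- generic fold lemmas ------------------------------------------------------

theorem foldl_inv {α β : Type} (P : α → Prop) (f : α → β → α) :
    ∀ (l : List β) (a : α), P a → (∀ x b, P x → b ∈ l → P (f x b)) → P (l.foldl f a) := by
  intro l
  induction l with
  | nil => intro a h _; exact h
  | cons b t ih =>
    intro a h hf
    exact ih _ (hf a b h (by simp)) (fun x c hx hc => hf x c hx (by simp [hc]))

theorem foldl_congr_inv {α β : Type} (P : α → Prop) (f f' : α → β → α) :
    ∀ (l : List β) (a : α), P a → (∀ x b, P x → b ∈ l → P (f x b)) →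
      (∀ x b, P x → b ∈ l → f x b = f' x b) → l.foldl f a = l.foldl f' a := by
  intro l
  induction l with
  | nil => intro a _ _ _; rfl
  | cons b t ih =>
    intro a h hf he
    simp only [List.foldl_cons]
    rw [← he a b h (by simp)]
    exact ih _ (hf a b h (by simp)) (fun x c hx hc => hf x c hx (by simp [hc]))
      (fun x c hx hc => he x c hx (by simp [hc]))

theorem getD_set {α : Type} (l : List α) (i : Nat) (v d : α) (j : Nat) (hi : i < l.length) :
    (l.set i v).getD j d = if j = i then v else l.getD j d := by
  by_cases h : j = i
  · subst h
    rw [List.getD_eq_getElem _ _ (by simpa using hi : j < (l.set j v).length), List.getElem_set, if_pos rfl, if_pos rfl]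
  · simp only [List.getD_eq_getElem?_getD]
    rw [List.getElem?_set_ne (by omega : i ≠ j), if_neg h]

theorem foldl_localized_nat {α β : Type} (d : α) (x : Nat) (φ : α → β → α) :
    ∀ (is : List β) (l : List α), x < l.length →
      is.foldl (fun g i => g.set x (φ (g.getD x d) i)) l = l.set x (is.foldl φ (l.getD x d)) := by
  intro is
  induction is with
  | nil =>
    intro l hl
    simp only [List.foldl_nil]
    rw [List.getD_eq_getElem _ _ hl]
    exact (List.set_getElem_self hl).symm
  | cons i t ih =>
    intro l hl
    simp only [List.foldl_cons]
    rw [ih _ (by simpa using hl)]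
    rw [getD_set _ _ _ _ _ hl, if_pos rfl, List.set_set]

theorem foldl_set_range {α : Type} (d : α) (h : Int → α → α) (a b : Int) (l : List α)
    (ha : 0 ≤ a) (hb : b ≤ (l.length : Int)) :
    (PySem.List.pyRange a b 1).foldl (fun g i => g.set i.toNat (h i (g.getD i.toNat d))) l
      = l.mapIdx (fun k v => if a ≤ (k : Int) ∧ (k : Int) < b then h k v else v) := by
  obtain ⟨n, hn⟩ : ∃ n : Nat, (b - a).toNat = n := ⟨_, rfl⟩
  induction n generalizing a l with
  | zero =>
    rw [PySem.List.pyRange_one_eq_nil (by omega), List.foldl_nil]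
    refine List.ext_getElem (by simp) ?_
    intro k hk hk'
    simp only [List.getElem_mapIdx]
    rw [if_neg (by omega)]
  | succ n ih =>
    rw [PySem.List.pyRange_one_cons (by omega), List.foldl_cons]
    rw [ih (a + 1) _ (by omega) (by simpa using hb) (by omega)]
    refine List.ext_getElem (by simp) ?_
    intro k hk1 hk2
    have hkl : k < l.length := by simpa using hk2
    simp only [List.getElem_mapIdx, List.getElem_set]
    by_cases hke : k = a.toNat
    · subst hke
      rw [if_neg (by omega), if_pos rfl, if_pos (by omega)]
      rw [List.getD_eq_getElem _ _ (by omega : a.toNat < l.length)]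
      congr 1
      omega
    · have hne : ¬ (a.toNat = k) := fun hh => hke hh.symm
      rw [if_neg hne]
      by_cases hc : a + 1 ≤ (k : Int) ∧ (k : Int) < b
      · rw [if_pos hc, if_pos (by omega)]
      · rw [if_neg hc, if_neg (by omega)]

-- pyAddAt3 normal form and shape preservation ------------------------------

theorem pyAddAt3_eq_set (g : List (List (List Int))) (x y z w : Int)
    (hx : 0 ≤ x) (hy : 0 ≤ y) (hz : 0 ≤ z) :
    pyAddAt3 g x y z w
      = g.set x.toNat ((g.getD x.toNat []).set y.toNat
          (((g.getD x.toNat []).getD y.toNat []).set z.toNat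
            (((g.getD x.toNat []).getD y.toNat []).getD z.toNat 0 + w))) := by
  lift x to Nat using hx with xn
  lift y to Nat using hy with yn
  lift z to Nat using hz with zn
  simp [pyAddAt3]

theorem Sh_pyAddAt3 (g : List (List (List Int))) (x y z w : Int) (hsh : Sh g)
    (hx : 0 ≤ x ∧ x < 18) (hy : 0 ≤ y ∧ y < 17) (hz : 0 ≤ z ∧ z < 8) :
    Sh (pyAddAt3 g x y z w) := by
  obtain ⟨hlen, hrows⟩ := hsh
  rw [pyAddAt3_eq_set g x y z w hx.1 hy.1 hz.1]
  refine ⟨by simpa using hlen, ?_⟩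
  intro x' hx'
  rw [getD_set _ _ _ _ _ (by omega)]
  by_cases hex : x' = x.toNat
  · rw [if_pos hex]
    obtain ⟨hrl, hsubs⟩ := hrows x.toNat (by omega)
    constructor
    · simpa using hrl
    · intro y' hy'
      rw [getD_set _ _ _ _ _ (by omega)]
      by_cases hey : y' = y.toNat
      · rw [if_pos hey]
        simpa using hsubs y.toNat (by omega)
      · rw [if_neg hey]
        exact hsubs y' hy'
  · rw [if_neg hex]
    exact hrows x' hx'

theorem pyAddAt3_zero (g : List (List (List Int))) (x y z : Int) (hsh : Sh g)
    (hx : 0 ≤ x ∧ x < 18) (hy : 0 ≤ y ∧ y < 17) (hz : 0 ≤ z ∧ z < 8) :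
    pyAddAt3 g x y z 0 = g := by
  obtain ⟨hlen, hrows⟩ := hsh
  obtain ⟨hrl, hsubs⟩ := hrows x.toNat (by omega)
  have hsl := hsubs y.toNat (by omega)
  rw [pyAddAt3_eq_set g x y z 0 hx.1 hy.1 hz.1, add_zero]
  rw [List.getD_eq_getElem _ _ (by omega : z.toNat < ((g.getD x.toNat []).getD y.toNat []).length),
      List.set_getElem_self]
  rw [List.getD_eq_getElem _ _ (by omega : y.toNat < (g.getD x.toNat []).length),
      List.set_getElem_self]
  rw [List.getD_eq_getElem _ _ (by omega : x.toNat < g.length), List.set_getElem_self]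

-- A's innermost loop: add each gate's penalty to one fixed cell ------------

theorem pyAddAt3_comp (g : List (List (List Int))) (x y z w1 w2 : Int) (hsh : Sh g)
    (hx : 0 ≤ x ∧ x < 18) (hy : 0 ≤ y ∧ y < 17) (hz : 0 ≤ z ∧ z < 8) :
    pyAddAt3 (pyAddAt3 g x y z w1) x y z w2 = pyAddAt3 g x y z (w1 + w2) := by
  obtain ⟨hlen, hrows⟩ := hsh
  obtain ⟨hrl, hsubs⟩ := hrows x.toNat (by omega)
  have hsl := hsubs y.toNat (by omega)
  rw [pyAddAt3_eq_set g x y z w1 hx.1 hy.1 hz.1]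
  rw [pyAddAt3_eq_set _ x y z w2 hx.1 hy.1 hz.1]
  rw [pyAddAt3_eq_set g x y z (w1 + w2) hx.1 hy.1 hz.1]
  rw [getD_set _ _ _ _ _ (by omega), if_pos rfl]
  rw [getD_set _ _ _ _ _ (by omega), if_pos rfl]
  rw [getD_set _ _ _ _ _ (by omega), if_pos rfl]
  rw [List.set_set, List.set_set, List.set_set, add_assoc]

theorem gatefold_eq (gs : List (String × List Int)) (heat x y z : Int)
    (g : List (List (List Int))) (hsh : Sh g)
    (hx : 0 ≤ x ∧ x < 18) (hy : 0 ≤ y ∧ y < 17) (hz : 0 ≤ z ∧ z < 8) :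
    gs.foldl (fun g p => pyAddAt3 g x y z (pen heat x y z p)) g
      = pyAddAt3 g x y z ((gs.map (pen heat x y z)).sum) := by
  induction gs generalizing g with
  | nil =>
    simp only [List.foldl_nil, List.map_nil, List.sum_nil]
    exact (pyAddAt3_zero g x y z ⟨hsh.1, hsh.2⟩ hx hy hz).symm
  | cons p t ih =>
    simp only [List.foldl_cons, List.map_cons, List.sum_cons]
    rw [ih _ (Sh_pyAddAt3 g x y z _ hsh hx hy hz)]
    exact pyAddAt3_comp g x y z _ _ hsh hx hy hz

-- the generic boxed triple loop of cell additions --------------------------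

theorem zfold_eq (stepC : List (List (List Int)) → Int → List (List (List Int)))
    (w : Int → Int) (x y az bz : Int)
    (h5 : 0 ≤ az) (h6 : bz ≤ 8)
    (hstep : ∀ g z, Sh g → az ≤ z → z < bz → stepC g z = pyAddAt3 g x y z (w z))
    (g : List (List (List Int))) (hsh : Sh g) (hx : 0 ≤ x ∧ x < 18) (hy : 0 ≤ y ∧ y < 17) :
    (PySem.List.pyRange az bz 1).foldl stepC g
      = g.set x.toNat ((g.getD x.toNat []).set y.toNat
          (((g.getD x.toNat []).getD y.toNat []).mapIdx
            (fun k v => if az ≤ (k : Int) ∧ (k : Int) < bz then v + w k else v))) := by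
  obtain ⟨hlen, hrows⟩ := hsh
  obtain ⟨hrl, hsubs⟩ := hrows x.toNat (by omega)
  have hsl := hsubs y.toNat (by omega)
  rw [foldl_congr_inv Sh stepC
      (fun g z => g.set x.toNat ((g.getD x.toNat []).set y.toNat
        (((g.getD x.toNat []).getD y.toNat []).set z.toNat
          ((((g.getD x.toNat []).getD y.toNat []).getD z.toNat 0) + w z)))) _ _ ⟨hlen, hrows⟩
      (fun g' z hg' hz => by
        rw [hstep g' z hg' (PySem.List.mem_pyRange_one.mp hz).1 (PySem.List.mem_pyRange_one.mp hz).2]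
        exact Sh_pyAddAt3 g' x y z _ hg' hx hy
          ⟨by have := (PySem.List.mem_pyRange_one.mp hz).1; omega,
           by have := (PySem.List.mem_pyRange_one.mp hz).2; omega⟩)
      (fun g' z hg' hz => by
        have hz1 := (PySem.List.mem_pyRange_one.mp hz).1
        have hz2 := (PySem.List.mem_pyRange_one.mp hz).2
        rw [hstep g' z hg' hz1 hz2]
        exact pyAddAt3_eq_set g' x y z (w z) hx.1 hy.1 (by omega))]
  rw [foldl_localized_nat ([] : List (List Int)) x.toNat
      (fun row z => row.set y.toNat ((row.getD y.toNat []).set z.toNat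
        ((row.getD y.toNat []).getD z.toNat 0 + w z))) _ _ (by omega)]
  rw [foldl_localized_nat ([] : List Int) y.toNat
      (fun sub z => sub.set z.toNat (sub.getD z.toNat 0 + w z)) _ _ (by omega)]
  rw [foldl_set_range (0 : Int) (fun z v => v + w z) az bz _ h5 (by rw [hsl]; omega)]

theorem yfold_eq (stepC : List (List (List Int)) → Int → Int → List (List (List Int)))
    (w : Int → Int → Int) (x ay by' az bz : Int)
    (h3 : 0 ≤ ay) (h4 : by' ≤ 17) (h5 : 0 ≤ az) (h6 : bz ≤ 8)
    (hstep : ∀ g y z, Sh g → ay ≤ y → y < by' → az ≤ z → z < bz →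
      stepC g y z = pyAddAt3 g x y z (w y z))
    (g : List (List (List Int))) (hsh : Sh g) (hx : 0 ≤ x ∧ x < 18) :
    (PySem.List.pyRange ay by' 1).foldl (fun g y =>
      (PySem.List.pyRange az bz 1).foldl (fun g z => stepC g y z) g) g
      = g.set x.toNat ((g.getD x.toNat []).mapIdx
          (fun j sub => if ay ≤ (j : Int) ∧ (j : Int) < by' then
            sub.mapIdx (fun k v => if az ≤ (k : Int) ∧ (k : Int) < bz then v + w j k else v)
          else sub)) := by
  have hpres : ∀ g' (y : Int), Sh g' → y ∈ PySem.List.pyRange ay by' 1 →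
      Sh ((PySem.List.pyRange az bz 1).foldl (fun g z => stepC g y z) g') := by
    intro g' y hg' hy
    have hy1 := (PySem.List.mem_pyRange_one.mp hy).1
    have hy2 := (PySem.List.mem_pyRange_one.mp hy).2
    refine foldl_inv Sh _ _ _ hg' ?_
    intro g'' z hg'' hz
    have hz1 := (PySem.List.mem_pyRange_one.mp hz).1
    have hz2 := (PySem.List.mem_pyRange_one.mp hz).2
    rw [hstep g'' y z hg'' hy1 hy2 hz1 hz2]
    exact Sh_pyAddAt3 g'' x y z _ hg'' hx ⟨by omega, by omega⟩ ⟨by omega, by omega⟩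
  rw [foldl_congr_inv Sh _
      (fun g y => g.set x.toNat ((g.getD x.toNat []).set y.toNat
        (((g.getD x.toNat []).getD y.toNat []).mapIdx
          (fun k v => if az ≤ (k : Int) ∧ (k : Int) < bz then v + w y k else v)))) _ _ hsh hpres
      (fun g' y hg' hy => by
        have hy1 := (PySem.List.mem_pyRange_one.mp hy).1
        have hy2 := (PySem.List.mem_pyRange_one.mp hy).2
        have hyb : 0 ≤ y ∧ y < 17 := ⟨by omega, by omega⟩
        exact zfold_eq (fun g z => stepC g y z) (w y) x y az bz h5 h6
          (fun g'' z hg'' hz1 hz2 => hstep g'' y z hg'' hy1 hy2 hz1 hz2) g' hg' hx hyb)]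
  have hxlen : x.toNat < g.length := by rw [hsh.1]; omega
  rw [foldl_localized_nat ([] : List (List Int)) x.toNat
      (fun row y => row.set y.toNat ((row.getD y.toNat []).mapIdx
        (fun k v => if az ≤ (k : Int) ∧ (k : Int) < bz then v + w y k else v))) _ _ hxlen]
  rw [foldl_set_range ([] : List Int)
      (fun y sub => sub.mapIdx (fun k v => if az ≤ (k : Int) ∧ (k : Int) < bz then v + w y k else v))
      ay by' _ h3 (by have := (hsh.2 x.toNat (by omega)).1; rw [this]; omega)]

theorem triple_step_eq (stepC : List (List (List Int)) → Int → Int → Int → List (List (List Int)))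
    (w : Int → Int → Int → Int) (ax bx ay by' az bz : Int)
    (h1 : 0 ≤ ax) (h2 : bx ≤ 18) (h3 : 0 ≤ ay) (h4 : by' ≤ 17) (h5 : 0 ≤ az) (h6 : bz ≤ 8)
    (hstep : ∀ g x y z, Sh g → ax ≤ x → x < bx → ay ≤ y → y < by' → az ≤ z → z < bz →
      stepC g x y z = pyAddAt3 g x y z (w x y z))
    (g : List (List (List Int))) (hsh : Sh g) :
    (PySem.List.pyRange ax bx 1).foldl (fun g x =>
      (PySem.List.pyRange ay by' 1).foldl (fun g y =>
        (PySem.List.pyRange az bz 1).foldl (fun g z => stepC g x y z) g) g) g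
    = g.mapIdx (fun i row => if ax ≤ (i : Int) ∧ (i : Int) < bx then
        row.mapIdx (fun j sub => if ay ≤ (j : Int) ∧ (j : Int) < by' then
          sub.mapIdx (fun k v => if az ≤ (k : Int) ∧ (k : Int) < bz then v + w i j k else v)
        else sub) else row) := by
  have hpres : ∀ g' (x : Int), Sh g' → x ∈ PySem.List.pyRange ax bx 1 →
      Sh ((PySem.List.pyRange ay by' 1).foldl (fun g y =>
        (PySem.List.pyRange az bz 1).foldl (fun g z => stepC g x y z) g) g') := by
    intro g' x hg' hxm
    have hx1 := (PySem.List.mem_pyRange_one.mp hxm).1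
    have hx2 := (PySem.List.mem_pyRange_one.mp hxm).2
    refine foldl_inv Sh _ _ _ hg' ?_
    intro g'' y hg'' hym
    have hy1 := (PySem.List.mem_pyRange_one.mp hym).1
    have hy2 := (PySem.List.mem_pyRange_one.mp hym).2
    refine foldl_inv Sh _ _ _ hg'' ?_
    intro g3 z hg3 hzm
    have hz1 := (PySem.List.mem_pyRange_one.mp hzm).1
    have hz2 := (PySem.List.mem_pyRange_one.mp hzm).2
    rw [hstep g3 x y z hg3 hx1 hx2 hy1 hy2 hz1 hz2]
    exact Sh_pyAddAt3 g3 x y z _ hg3 ⟨by omega, by omega⟩ ⟨by omega, by omega⟩ ⟨by omega, by omega⟩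
  rw [foldl_congr_inv Sh _
      (fun g x => g.set x.toNat ((g.getD x.toNat []).mapIdx
        (fun j sub => if ay ≤ (j : Int) ∧ (j : Int) < by' then
          sub.mapIdx (fun k v => if az ≤ (k : Int) ∧ (k : Int) < bz then v + w x j k else v)
        else sub))) _ _ hsh hpres
      (fun g' x hg' hxm => by
        have hx1 := (PySem.List.mem_pyRange_one.mp hxm).1
        have hx2 := (PySem.List.mem_pyRange_one.mp hxm).2
        have hxb : 0 ≤ x ∧ x < 18 := ⟨by omega, by omega⟩
        exact yfold_eq (fun g y z => stepC g x y z) (w x) x ay by' az bz h3 h4 h5 h6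
          (fun g'' y z hg'' hy1 hy2 hz1 hz2 => hstep g'' x y z hg'' hx1 hx2 hy1 hy2 hz1 hz2)
          g' hg' hxb)]
  rw [foldl_set_range ([] : List (List Int))
      (fun x row => row.mapIdx (fun j sub => if ay ≤ (j : Int) ∧ (j : Int) < by' then
        sub.mapIdx (fun k v => if az ≤ (k : Int) ∧ (k : Int) < bz then v + w x j k else v)
      else sub)) ax bx _ h1 (by rw [hsh.1]; omega)]

-- boxed weight = clamped penalty at every grid cell ------------------------

theorem box_pen (heat gx gy gz x y z : Int)
    (hx : 0 ≤ x) (hx' : x < 18) (hy : 0 ≤ y) (hy' : y < 17) (hz : 0 ≤ z) (hz' : z < 8) :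
    (if (max 0 (gx - PySem.Int.floordiv heat 2) ≤ x ∧ x < min 17 (gx + PySem.Int.floordiv heat 2) + 1)
        ∧ (max 0 (gy - PySem.Int.floordiv heat 2) ≤ y ∧ y < min 16 (gy + PySem.Int.floordiv heat 2) + 1)
        ∧ (max 0 (gz - PySem.Int.floordiv heat 2) ≤ z ∧ z < min 7 (gz + PySem.Int.floordiv heat 2) + 1)
      then (if 0 < heat - 2 * (|x - gx| + |y - gy| + |z - gz|)
            then heat - 2 * (|x - gx| + |y - gy| + |z - gz|) else 0) else 0)
    = (if heat - (|x - gx| + |y - gy| + |z - gz|) * 2 < 0 then 0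
       else heat - (|x - gx| + |y - gy| + |z - gz|) * 2) := by
  have hr := (PySem.Int.floordiv_eq_iff_of_pos (by norm_num : (0:Int) < 2)
    (a := heat) (q := PySem.Int.floordiv heat 2)).mp rfl
  rcases abs_cases (x - gx) with h1 | h1 <;>
    rcases abs_cases (y - gy) with h2 | h2 <;>
      rcases abs_cases (z - gz) with h3 | h3 <;>
        rw [h1.1, h2.1, h3.1] <;> split_ifs <;> omega

-- addGrid toolkit ----------------------------------------------------------

theorem Sh_addGrid (g : List (List (List Int))) (f : Int → Int → Int → Int) (hsh : Sh g) :
    Sh (addGrid g f) := by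
  obtain ⟨hlen, hrows⟩ := hsh
  refine ⟨by simp [addGrid, hlen], ?_⟩
  intro x hx
  have hx' : x < g.length := by omega
  have h1 : (addGrid g f).getD x [] = (g[x]).mapIdx (fun y sub => sub.mapIdx (fun z v => v + f x y z)) := by
    rw [List.getD_eq_getElem _ _ (by simpa [addGrid] using hx')]
    simp [addGrid]
  obtain ⟨hrl, hsubs⟩ := hrows x hx
  rw [List.getD_eq_getElem _ _ hx'] at hrl hsubs
  refine ⟨by rw [h1]; simp [hrl], ?_⟩
  intro y hy
  have hy' : y < (g[x]).length := by omega
  rw [h1, List.getD_eq_getElem _ _ (by simpa using hy')]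
  have := hsubs y hy
  rw [List.getD_eq_getElem _ _ hy'] at this
  simp [this]

theorem addGrid_addGrid (g : List (List (List Int))) (f f' : Int → Int → Int → Int) :
    addGrid (addGrid g f) f' = addGrid g (fun x y z => f x y z + f' x y z) := by
  unfold addGrid
  refine List.ext_getElem (by simp) ?_
  intro x hx hx'
  simp only [List.getElem_mapIdx]
  refine List.ext_getElem (by simp) ?_
  intro y hy hy'
  simp only [List.getElem_mapIdx]
  refine List.ext_getElem (by simp) ?_
  intro z hz hz'
  simp only [List.getElem_mapIdx]
  ring

theorem addGrid_congr (g : List (List (List Int))) (f f' : Int → Int → Int → Int) (hsh : Sh g)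
    (h : ∀ x y z : Nat, x < 18 → y < 17 → z < 8 → f x y z = f' x y z) :
    addGrid g f = addGrid g f' := by
  obtain ⟨hlen, hrows⟩ := hsh
  unfold addGrid
  refine List.ext_getElem (by simp) ?_
  intro x hx hx'
  simp only [List.getElem_mapIdx]
  refine List.ext_getElem (by simp) ?_
  intro y hy hy'
  simp only [List.getElem_mapIdx]
  refine List.ext_getElem (by simp) ?_
  intro z hz hz'
  simp only [List.getElem_mapIdx]
  have hxg : x < g.length := by simpa using hx'
  have h18 : x < 18 := by omega
  obtain ⟨hrl, hsubs⟩ := hrows x h18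
  rw [List.getD_eq_getElem _ _ hxg] at hrl hsubs
  have hyg : y < (g[x]).length := by simpa using hy'
  have h17 : y < 17 := by omega
  have := hsubs y h17
  rw [List.getD_eq_getElem _ _ hyg] at this
  have hzg : z < (g[x][y]).length := by simpa using hz'
  have h8 : z < 8 := by omega
  rw [h x y z h18 h17 h8]

theorem mapIdx_triple_eq_addGrid (g : List (List (List Int))) (w : Int → Int → Int → Int)
    (ax bx ay by' az bz : Int) :
    g.mapIdx (fun i row => if ax ≤ (i : Int) ∧ (i : Int) < bx then
        row.mapIdx (fun j sub => if ay ≤ (j : Int) ∧ (j : Int) < by' then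
          sub.mapIdx (fun k v => if az ≤ (k : Int) ∧ (k : Int) < bz then v + w i j k else v)
        else sub) else row)
    = addGrid g (fun x y z => if (ax ≤ x ∧ x < bx) ∧ (ay ≤ y ∧ y < by') ∧ (az ≤ z ∧ z < bz)
        then w x y z else 0) := by
  unfold addGrid
  refine List.ext_getElem (by simp) ?_
  intro x hx hx'
  simp only [List.getElem_mapIdx]
  by_cases hcx : ax ≤ (x : Int) ∧ (x : Int) < bx
  · rw [if_pos hcx]
    refine List.ext_getElem (by simp) ?_
    intro y hy hy'
    simp only [List.getElem_mapIdx]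
    by_cases hcy : ay ≤ (y : Int) ∧ (y : Int) < by'
    · rw [if_pos hcy]
      refine List.ext_getElem (by simp) ?_
      intro z hz hz'
      simp only [List.getElem_mapIdx]
      by_cases hcz : az ≤ (z : Int) ∧ (z : Int) < bz
      · rw [if_pos hcz, if_pos ⟨hcx, hcy, hcz⟩]
      · rw [if_neg hcz, if_neg (by tauto), add_zero]
    · rw [if_neg hcy]
      refine List.ext_getElem (by simp) ?_
      intro z hz hz'
      simp only [List.getElem_mapIdx]
      rw [if_neg (by tauto), add_zero]
  · rw [if_neg hcx]
    refine List.ext_getElem (by simp) ?_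
    intro y hy hy'
    simp only [List.getElem_mapIdx]
    refine List.ext_getElem (by simp) ?_
    intro z hz hz'
    simp only [List.getElem_mapIdx]
    rw [if_neg (by tauto), add_zero]

theorem addGrid_zero (g : List (List (List Int))) :
    addGrid g (fun _ _ _ => 0) = g := by
  unfold addGrid
  refine List.ext_getElem (by simp) ?_
  intro x hx hx'
  simp only [List.getElem_mapIdx]
  refine List.ext_getElem (by simp) ?_
  intro y hy hy'
  simp only [List.getElem_mapIdx]
  refine List.ext_getElem (by simp) ?_
  intro z hz hz'
  simp only [List.getElem_mapIdx, add_zero]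

theorem foldl_addGrid {P : Type} (wts : P → Int → Int → Int → Int) :
    ∀ (gs : List P) (g : List (List (List Int))), Sh g →
      gs.foldl (fun g p => addGrid g (wts p)) g
        = addGrid g (fun x y z => (gs.map (fun p => wts p x y z)).sum) := by
  intro gs
  induction gs with
  | nil =>
    intro g _
    simp only [List.foldl_nil, List.map_nil, List.sum_nil]
    exact (addGrid_zero g).symm
  | cons p t ih =>
    intro g hsh
    simp only [List.foldl_cons, List.map_cons, List.sum_cons]
    rw [ih _ (Sh_addGrid g _ hsh), addGrid_addGrid]

theorem Sh_zeroGrid : Sh zeroGrid := by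
  unfold zeroGrid
  constructor
  · simp [PySem.List.length_pyRange_one]
  · intro x hx
    rw [List.getD_eq_getElem _ _ (by simp [PySem.List.length_pyRange_one]; omega)]
    simp only [List.getElem_map]
    constructor
    · simp [PySem.List.length_pyRange_one]
    · intro y hy
      rw [List.getD_eq_getElem _ _ (by simp [PySem.List.length_pyRange_one]; omega)]
      simp [PySem.List.length_pyRange_one]
      interval_cases y <;> rfl

-- the two sides ------------------------------------------------------------

theorem len_row (g : List (List (List Int))) (x : Int) (hsh : Sh g) (hx : 0 ≤ x ∧ x < 18) :
    PySem.List.len (PySem.List.pyGetD g x []) = 17 := by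
  obtain ⟨hx1, hx2⟩ := hx
  lift x to Nat using hx1 with xn
  have h18 : xn < 18 := by exact_mod_cast hx2
  simp only [PySem.List.pyGetD_natCast, PySem.List.len_eq, (hsh.2 xn h18).1]
  rfl

theorem len_sub (g : List (List (List Int))) (x y : Int) (hsh : Sh g)
    (hx : 0 ≤ x ∧ x < 18) (hy : 0 ≤ y ∧ y < 17) :
    PySem.List.len (PySem.List.pyGetD (PySem.List.pyGetD g x []) y []) = 8 := by
  obtain ⟨hx1, hx2⟩ := hx
  obtain ⟨hy1, hy2⟩ := hy
  lift x to Nat using hx1 with xn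
  lift y to Nat using hy1 with yn
  have h18 : xn < 18 := by exact_mod_cast hx2
  have h17 : yn < 17 := by exact_mod_cast hy2
  simp only [PySem.List.pyGetD_natCast, PySem.List.len_eq, (hsh.2 xn h18).2 yn h17]
  rfl

theorem calc_eval (x y z : Int) (b : List Int) :
    calc_admissable [x, y, z] b
      = |x - PySem.List.pyGetD b 0 0| + |y - PySem.List.pyGetD b 1 0| + |z - PySem.List.pyGetD b 2 0| := by
  rfl

theorem A_eq_addGrid (points_dict : List (String × List Int)) (heat : Int) :
    initialise_penalty_grid points_dict heat
      = addGrid zeroGrid (fun x y z =>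
          (((PySem.Dict.ofList points_dict).items).map (pen heat x y z)).sum) := by
  show (PySem.List.pyRange 0 (PySem.List.len zeroGrid) 1).foldl (fun g x =>
      (PySem.List.pyRange 0 (PySem.List.len (PySem.List.pyGetD g x [])) 1).foldl (fun g y =>
        (PySem.List.pyRange 0 (PySem.List.len (PySem.List.pyGetD (PySem.List.pyGetD g x []) y [])) 1).foldl (fun g z =>
          ((PySem.Dict.ofList points_dict).items).foldl (fun g gate =>
            pyAddAt3 g x y z (pen heat x y z gate)) g) g) g) zeroGrid = _
  have hzg : PySem.List.len zeroGrid = 18 := by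
    simp [zeroGrid, PySem.List.len_eq, PySem.List.length_pyRange_one]
  rw [hzg]
  have hgatepres : ∀ (g : List (List (List Int))) (x y z : Int), Sh g →
      0 ≤ x ∧ x < 18 → 0 ≤ y ∧ y < 17 → 0 ≤ z ∧ z < 8 →
      Sh (((PySem.Dict.ofList points_dict).items).foldl (fun g gate =>
        pyAddAt3 g x y z (pen heat x y z gate)) g) := by
    intro g x y z hg hx hy hz
    rw [gatefold_eq _ heat x y z g hg hx hy hz]
    exact Sh_pyAddAt3 g x y z _ hg hx hy hz
  rw [foldl_congr_inv Sh _ (fun g x =>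
      (PySem.List.pyRange 0 17 1).foldl (fun g y =>
        (PySem.List.pyRange 0 8 1).foldl (fun g z =>
          ((PySem.Dict.ofList points_dict).items).foldl (fun g gate =>
            pyAddAt3 g x y z (pen heat x y z gate)) g) g) g) _ _ Sh_zeroGrid
    (by
      intro g x hg hxm
      have hx1 := (PySem.List.mem_pyRange_one.mp hxm).1
      have hx2 := (PySem.List.mem_pyRange_one.mp hxm).2
      refine foldl_inv Sh _ _ _ hg ?_
      intro g' y hg' hym
      have hy1 := (PySem.List.mem_pyRange_one.mp hym).1
      have hy2 : y < 17 := by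
        have := (PySem.List.mem_pyRange_one.mp hym).2
        rwa [len_row g x hg ⟨hx1, hx2⟩] at this
      refine foldl_inv Sh _ _ _ hg' ?_
      intro g'' z hg'' hzm
      have hz1 := (PySem.List.mem_pyRange_one.mp hzm).1
      have hz2 : z < 8 := by
        have := (PySem.List.mem_pyRange_one.mp hzm).2
        rwa [len_sub g' x y hg' ⟨hx1, hx2⟩ ⟨hy1, hy2⟩] at this
      exact hgatepres g'' x y z hg'' ⟨hx1, hx2⟩ ⟨hy1, hy2⟩ ⟨hz1, hz2⟩)
    (by
      intro g x hg hxm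
      have hx1 := (PySem.List.mem_pyRange_one.mp hxm).1
      have hx2 := (PySem.List.mem_pyRange_one.mp hxm).2
      rw [len_row g x hg ⟨hx1, hx2⟩]
      refine foldl_congr_inv Sh _ _ _ _ hg ?_ ?_
      · intro g' y hg' hym
        have hy1 := (PySem.List.mem_pyRange_one.mp hym).1
        have hy2 := (PySem.List.mem_pyRange_one.mp hym).2
        refine foldl_inv Sh _ _ _ hg' ?_
        intro g'' z hg'' hzm
        have hz1 := (PySem.List.mem_pyRange_one.mp hzm).1
        have hz2 : z < 8 := by
          have := (PySem.List.mem_pyRange_one.mp hzm).2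
          rwa [len_sub g' x y hg' ⟨hx1, hx2⟩ ⟨hy1, hy2⟩] at this
        exact hgatepres g'' x y z hg'' ⟨hx1, hx2⟩ ⟨hy1, hy2⟩ ⟨hz1, hz2⟩
      · intro g' y hg' hym
        have hy1 := (PySem.List.mem_pyRange_one.mp hym).1
        have hy2 := (PySem.List.mem_pyRange_one.mp hym).2
        rw [len_sub g' x y hg' ⟨hx1, hx2⟩ ⟨hy1, hy2⟩])]
  rw [triple_step_eq (fun g x y z =>
      ((PySem.Dict.ofList points_dict).items).foldl (fun g gate =>
        pyAddAt3 g x y z (pen heat x y z gate)) g)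
      (fun x y z => (((PySem.Dict.ofList points_dict).items).map (pen heat x y z)).sum)
      0 18 0 17 0 8 (by norm_num) (by norm_num) (by norm_num) (by norm_num) (by norm_num) (by norm_num)
      (fun g x y z hg hx1 hx2 hy1 hy2 hz1 hz2 =>
        gatefold_eq _ heat x y z g hg ⟨hx1, hx2⟩ ⟨hy1, hy2⟩ ⟨hz1, hz2⟩)
      zeroGrid Sh_zeroGrid]
  rw [mapIdx_triple_eq_addGrid zeroGrid
      (fun x y z => (((PySem.Dict.ofList points_dict).items).map (pen heat x y z)).sum)
      0 18 0 17 0 8]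
  exact addGrid_congr zeroGrid _ _ Sh_zeroGrid (fun x y z hx hy hz => by
    rw [if_pos ⟨⟨by omega, by omega⟩, ⟨by omega, by omega⟩, ⟨by omega, by omega⟩⟩])

theorem B_eq_addGrid (points_dict : List (String × List Int)) (heat : Int) :
    initialise_penalty_grid_alt points_dict heat
      = addGrid zeroGrid (fun x y z =>
          (((PySem.Dict.ofList points_dict).items).map (pen heat x y z)).sum) := by
  show ((PySem.Dict.ofList points_dict).items).foldl (fun g gate =>
      (PySem.List.pyRange (max 0 (PySem.List.pyGetD gate.2 0 0 - PySem.Int.floordiv heat 2))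
          (min 17 (PySem.List.pyGetD gate.2 0 0 + PySem.Int.floordiv heat 2) + 1) 1).foldl (fun g x =>
        (PySem.List.pyRange (max 0 (PySem.List.pyGetD gate.2 1 0 - PySem.Int.floordiv heat 2))
            (min 16 (PySem.List.pyGetD gate.2 1 0 + PySem.Int.floordiv heat 2) + 1) 1).foldl (fun g y =>
          (PySem.List.pyRange (max 0 (PySem.List.pyGetD gate.2 2 0 - PySem.Int.floordiv heat 2))
              (min 7 (PySem.List.pyGetD gate.2 2 0 + PySem.Int.floordiv heat 2) + 1) 1).foldl (fun g z =>
            if 0 < heat - 2 * calc_admissable [x, y, z]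
                [PySem.List.pyGetD gate.2 0 0, PySem.List.pyGetD gate.2 1 0, PySem.List.pyGetD gate.2 2 0]
            then pyAddAt3 g x y z (heat - 2 * calc_admissable [x, y, z]
                [PySem.List.pyGetD gate.2 0 0, PySem.List.pyGetD gate.2 1 0, PySem.List.pyGetD gate.2 2 0])
            else g) g) g) g) zeroGrid = _
  have hsc : ∀ (g : List (List (List Int))) (gate : String × List Int), Sh g →
      (PySem.List.pyRange (max 0 (PySem.List.pyGetD gate.2 0 0 - PySem.Int.floordiv heat 2))
          (min 17 (PySem.List.pyGetD gate.2 0 0 + PySem.Int.floordiv heat 2) + 1) 1).foldl (fun g x =>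
        (PySem.List.pyRange (max 0 (PySem.List.pyGetD gate.2 1 0 - PySem.Int.floordiv heat 2))
            (min 16 (PySem.List.pyGetD gate.2 1 0 + PySem.Int.floordiv heat 2) + 1) 1).foldl (fun g y =>
          (PySem.List.pyRange (max 0 (PySem.List.pyGetD gate.2 2 0 - PySem.Int.floordiv heat 2))
              (min 7 (PySem.List.pyGetD gate.2 2 0 + PySem.Int.floordiv heat 2) + 1) 1).foldl (fun g z =>
            if 0 < heat - 2 * calc_admissable [x, y, z]
                [PySem.List.pyGetD gate.2 0 0, PySem.List.pyGetD gate.2 1 0, PySem.List.pyGetD gate.2 2 0]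
            then pyAddAt3 g x y z (heat - 2 * calc_admissable [x, y, z]
                [PySem.List.pyGetD gate.2 0 0, PySem.List.pyGetD gate.2 1 0, PySem.List.pyGetD gate.2 2 0])
            else g) g) g) g
      = addGrid g (fun x y z => pen heat x y z gate) := by
    intro g gate hg
    rw [triple_step_eq _
        (fun x y z => if 0 < heat - 2 * calc_admissable [x, y, z]
            [PySem.List.pyGetD gate.2 0 0, PySem.List.pyGetD gate.2 1 0, PySem.List.pyGetD gate.2 2 0]
          then heat - 2 * calc_admissable [x, y, z]
            [PySem.List.pyGetD gate.2 0 0, PySem.List.pyGetD gate.2 1 0, PySem.List.pyGetD gate.2 2 0]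
          else 0)
        _ _ _ _ _ _ (by omega) (by omega) (by omega) (by omega) (by omega) (by omega)
        (by
          intro g' x y z hg' hx1 hx2 hy1 hy2 hz1 hz2
          simp only []
          by_cases hp : 0 < heat - 2 * calc_admissable [x, y, z]
              [PySem.List.pyGetD gate.2 0 0, PySem.List.pyGetD gate.2 1 0, PySem.List.pyGetD gate.2 2 0]
          · rw [if_pos hp, if_pos hp]
          · rw [if_neg hp, if_neg hp]
            exact (pyAddAt3_zero g' x y z hg'
              ⟨by omega, by omega⟩ ⟨by omega, by omega⟩ ⟨by omega, by omega⟩).symm)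
        g hg]
    rw [mapIdx_triple_eq_addGrid g
        (fun x y z => if 0 < heat - 2 * calc_admissable [x, y, z]
            [PySem.List.pyGetD gate.2 0 0, PySem.List.pyGetD gate.2 1 0, PySem.List.pyGetD gate.2 2 0]
          then heat - 2 * calc_admissable [x, y, z]
            [PySem.List.pyGetD gate.2 0 0, PySem.List.pyGetD gate.2 1 0, PySem.List.pyGetD gate.2 2 0]
          else 0)]
    refine addGrid_congr g _ _ hg ?_
    intro x y z hx hy hz
    unfold pen
    rw [calc_eval, calc_eval]
    have e0 : PySem.List.pyGetD [PySem.List.pyGetD gate.2 0 0, PySem.List.pyGetD gate.2 1 0,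
        PySem.List.pyGetD gate.2 2 0] 0 0 = PySem.List.pyGetD gate.2 0 0 := rfl
    have e1 : PySem.List.pyGetD [PySem.List.pyGetD gate.2 0 0, PySem.List.pyGetD gate.2 1 0,
        PySem.List.pyGetD gate.2 2 0] 1 0 = PySem.List.pyGetD gate.2 1 0 := rfl
    have e2 : PySem.List.pyGetD [PySem.List.pyGetD gate.2 0 0, PySem.List.pyGetD gate.2 1 0,
        PySem.List.pyGetD gate.2 2 0] 2 0 = PySem.List.pyGetD gate.2 2 0 := rfl
    rw [e0, e1, e2]
    exact box_pen heat (PySem.List.pyGetD gate.2 0 0) (PySem.List.pyGetD gate.2 1 0)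
      (PySem.List.pyGetD gate.2 2 0) x y z (by omega) (by omega) (by omega) (by omega) (by omega) (by omega)
  rw [foldl_congr_inv Sh _ (fun g gate => addGrid g (fun x y z => pen heat x y z gate)) _ _
      Sh_zeroGrid
      (fun g gate hg _ => by rw [hsc g gate hg]; exact Sh_addGrid g _ hg)
      (fun g gate hg _ => hsc g gate hg)]
  rw [foldl_addGrid _ _ _ Sh_zeroGrid]

-- ===== VERDICT (by name: the statement is the Claim_ definition above) =====
theorem initialise_penalty_grid_spec : Claim_equal_initialise_penalty_grid := by
  intro points_dict heat _ _
  unfold Spec_initialise_penalty_grid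
  rw [A_eq_addGrid, B_eq_addGrid]
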